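-- pv_equiv track=rewrite | github.com/hiddenduck/University | bachelor's/LA2/Treino1/Robot.py | robot
-- ===== SOURCE A (Python) =====
-- def robot(comandos):
--     andar = {"N": (0,1), "S": (0,-1), "O": (-1,0), "E": (1,0)}
--     somar = lambda x,y: (x[0]+y[0], x[1]+y[1])
--     direcoes = {"N": "OE", "S": "EO", "O": "SN", "E": "NS"}
--     direcao = "N"
--     posicao = (0,0)
--     rectangulos = []
--     rectangulo = [0,0,0,0] # minX, minY, maxX, maxY
--
--     for comando in comandos:
--         if comando == 'A':
--             posicao = somar(posicao, andar[direcao])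
--             rectangulo[0] = min(rectangulo[0], posicao[0])
--             rectangulo[1] = min(rectangulo[1], posicao[1])
--             rectangulo[2] = max(rectangulo[2], posicao[0])
--             rectangulo[3] = max(rectangulo[3], posicao[1])
--         elif comando == 'E':
--             direcao = direcoes[direcao][0]
--         elif comando == 'D':
--             direcao = direcoes[direcao][1]
--         elif comando == "H":
--             posicao = (0,0)
--             rectangulos.append(tuple(rectangulo))
--             rectangulo = [0,0,0,0]
--             direcao = "N"
--
--     return rectangulos
-- ===== SOURCE B (Python) =====
-- def robot(comandos):
--     # Segment decomposition: collect the positions visited in the current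
--     # H-terminated segment (direction as a rotated unit vector), and fold
--     # min/max over the collected points only when the segment closes.
--     rects = []
--     pts = [(0, 0)]
--     dx, dy = 0, 1
--     for c in comandos:
--         if c == 'A':
--             x, y = pts[-1]
--             pts.append((x + dx, y + dy))
--         elif c == 'E':
--             dx, dy = -dy, dx
--         elif c == 'D':
--             dx, dy = dy, -dx
--         elif c == 'H':
--             xs = [p[0] for p in pts]
--             ys = [p[1] for p in pts]
--             rects.append((min(xs), min(ys), max(xs), max(ys)))
--             pts = [(0, 0)]
--             dx, dy = 0, 1
--     return rects
-- ===== Notes on version B (the rewrite author's own statement) =====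
-- stated objective: alternative
-- what changed: B drops A's string direction tables and inline running min/max: it tracks the direction as a unit vector rotated in place on turn commands and accumulates the list of positions visited in the current segment, folding min/max over the collected points only when the halt command closes the segment.
import Mathlib
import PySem

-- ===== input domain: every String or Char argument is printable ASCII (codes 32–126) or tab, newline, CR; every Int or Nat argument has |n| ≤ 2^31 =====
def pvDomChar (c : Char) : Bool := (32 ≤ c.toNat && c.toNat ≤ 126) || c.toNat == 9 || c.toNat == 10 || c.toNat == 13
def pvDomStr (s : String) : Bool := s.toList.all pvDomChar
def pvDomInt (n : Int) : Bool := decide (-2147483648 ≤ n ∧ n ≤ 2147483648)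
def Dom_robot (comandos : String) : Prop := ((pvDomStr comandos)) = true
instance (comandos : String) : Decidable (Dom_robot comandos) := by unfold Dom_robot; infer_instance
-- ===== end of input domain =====

-- B replaces A's inline running min/max and string direction tables by a per-segment
-- collect-the-visited-points list (direction as a rotated unit vector) whose bounding
-- rectangle is folded out only when 'H' closes the segment; objective: alternative.

-- ===== PORT A =====
def robotAndar : PySem.Dict Char (Int × Int) :=
  ((((PySem.Dict.empty).insert 'N' (0,1)).insert 'S' (0,-1)).insert 'O' (-1,0)).insert 'E' (1,0)

def robotSomar (x y : Int × Int) : Int × Int := (x.1 + y.1, x.2 + y.2)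

def robotDirecoes : PySem.Dict Char (List Char) :=
  ((((PySem.Dict.empty).insert 'N' ['O','E']).insert 'S' ['E','O']).insert 'O' ['S','N']).insert 'E' ['N','S']

-- one iteration of A's for-loop; state = (direcao, posicao, rectangulos, rectangulo)
def robotStep (st : Char × (Int × Int) × List (Int × Int × Int × Int) × (Int × Int × Int × Int))
    (comando : Char) : Char × (Int × Int) × List (Int × Int × Int × Int) × (Int × Int × Int × Int) :=
  let (direcao, posicao, rectangulos, rectangulo) := st
  if comando = 'A' then
    let posicao' := robotSomar posicao (robotAndar.getD direcao (0,0))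
    (direcao, posicao', rectangulos,
      (min rectangulo.1 posicao'.1, min rectangulo.2.1 posicao'.2,
       max rectangulo.2.2.1 posicao'.1, max rectangulo.2.2.2 posicao'.2))
  else if comando = 'E' then
    (PySem.List.pyGetD (robotDirecoes.getD direcao []) 0 'N', posicao, rectangulos, rectangulo)
  else if comando = 'D' then
    (PySem.List.pyGetD (robotDirecoes.getD direcao []) 1 'N', posicao, rectangulos, rectangulo)
  else if comando = 'H' then
    ('N', (0,0), rectangulos ++ [rectangulo], (0,0,0,0))
  else st

def robot (comandos : String) : List (Int × Int × Int × Int) :=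
  (comandos.toList.foldl robotStep ('N', (0,0), [], (0,0,0,0))).2.2.1

-- ===== PORT B =====
-- bounding rectangle of a (nonempty) collected point list: (min xs, min ys, max xs, max ys)
def robotAltRect (pts : List (Int × Int)) : Int × Int × Int × Int :=
  let xs := pts.map (fun p => p.1)
  let ys := pts.map (fun p => p.2)
  ((PySem.List.min? xs (fun v => v)).getD 0, (PySem.List.min? ys (fun v => v)).getD 0,
   (PySem.List.max? xs (fun v => v)).getD 0, (PySem.List.max? ys (fun v => v)).getD 0)

-- one iteration of B's for-loop; state = (rects, pts, (dx, dy))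
def robotAltStep (st : List (Int × Int × Int × Int) × List (Int × Int) × (Int × Int))
    (c : Char) : List (Int × Int × Int × Int) × List (Int × Int) × (Int × Int) :=
  let (rects, pts, d) := st
  if c = 'A' then
    let p := PySem.List.pyGetD pts (-1) (0,0)
    (rects, pts ++ [(p.1 + d.1, p.2 + d.2)], d)
  else if c = 'E' then (rects, pts, (-d.2, d.1))
  else if c = 'D' then (rects, pts, (d.2, -d.1))
  else if c = 'H' then (rects ++ [robotAltRect pts], [(0,0)], (0,1))
  else st

def robot_alt (comandos : String) : List (Int × Int × Int × Int) :=
  (comandos.toList.foldl robotAltStep ([], [(0,0)], (0,1))).1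

-- ===== PRECONDITION & SPEC =====
def Spec_robot (comandos : String) (out : List (Int × Int × Int × Int)) : Prop := out = robot_alt comandos
instance (comandos : String) (out : List (Int × Int × Int × Int)) : Decidable (Spec_robot comandos out) := by unfold Spec_robot; infer_instance

-- ===== CLAIM (what is proved, stated in full; the proofs are below) =====
def Claim_equal_robot : Prop := ∀ (comandos : String), Dom_robot comandos → Spec_robot comandos (robot comandos)

-- ===== LEMMAS AND PROOFS =====

-- A's direction letter as B's unit vector
def robotDirVec : Char → Int × Int
  | 'S' => (0,-1)
  | 'O' => (-1,0)
  | 'E' => (1,0)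
  | _ => (0,1)

-- coupling invariant between A's and B's loop states
def robotInv (a : Char × (Int × Int) × List (Int × Int × Int × Int) × (Int × Int × Int × Int))
    (b : List (Int × Int × Int × Int) × List (Int × Int) × (Int × Int)) : Prop :=
  (a.1 = 'N' ∨ a.1 = 'S' ∨ a.1 = 'O' ∨ a.1 = 'E') ∧
  b.2.2 = robotDirVec a.1 ∧
  a.2.2.1 = b.1 ∧
  b.2.1 ≠ [] ∧
  a.2.1 = PySem.List.pyGetD b.2.1 (-1) (0,0) ∧
  a.2.2.2 = robotAltRect b.2.1

theorem robot_min_append (xs : List Int) (hx : xs ≠ []) (a : Int) :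
    (PySem.List.min? (xs ++ [a]) (fun v => v)).getD 0
      = min ((PySem.List.min? xs (fun v => v)).getD 0) a := by
  obtain ⟨q, t, rfl⟩ := List.exists_cons_of_ne_nil hx
  simp [PySem.List.min?_id_cons, List.foldl_append]

theorem robot_max_append (xs : List Int) (hx : xs ≠ []) (a : Int) :
    (PySem.List.max? (xs ++ [a]) (fun v => v)).getD 0
      = max ((PySem.List.max? xs (fun v => v)).getD 0) a := by
  obtain ⟨q, t, rfl⟩ := List.exists_cons_of_ne_nil hx
  simp [PySem.List.max?_id_cons, List.foldl_append]

theorem robot_rect_append (pts : List (Int × Int)) (hp : pts ≠ []) (p : Int × Int) :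
    robotAltRect (pts ++ [p])
      = (min (robotAltRect pts).1 p.1, min (robotAltRect pts).2.1 p.2,
         max (robotAltRect pts).2.2.1 p.1, max (robotAltRect pts).2.2.2 p.2) := by
  have hx : pts.map (fun q => q.1) ≠ [] := by simpa using hp
  have hy : pts.map (fun q => q.2) ≠ [] := by simpa using hp
  simp [robotAltRect, robot_min_append _ hx, robot_max_append _ hy,
    robot_min_append _ hy, robot_max_append _ hx]

-- literal table lookups of the ports, evaluated once
theorem robot_andar_N : robotAndar.getD 'N' (0,0) = (0,1) := by decide
theorem robot_andar_S : robotAndar.getD 'S' (0,0) = (0,-1) := by decide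
theorem robot_andar_O : robotAndar.getD 'O' (0,0) = (-1,0) := by decide
theorem robot_andar_E : robotAndar.getD 'E' (0,0) = (1,0) := by decide
theorem robot_vire_N0 : PySem.List.pyGetD (robotDirecoes.getD 'N' []) 0 'N' = 'O' := by decide
theorem robot_vire_S0 : PySem.List.pyGetD (robotDirecoes.getD 'S' []) 0 'N' = 'E' := by decide
theorem robot_vire_O0 : PySem.List.pyGetD (robotDirecoes.getD 'O' []) 0 'N' = 'S' := by decide
theorem robot_vire_E0 : PySem.List.pyGetD (robotDirecoes.getD 'E' []) 0 'N' = 'N' := by decide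
theorem robot_vire_N1 : PySem.List.pyGetD (robotDirecoes.getD 'N' []) 1 'N' = 'E' := by decide
theorem robot_vire_S1 : PySem.List.pyGetD (robotDirecoes.getD 'S' []) 1 'N' = 'O' := by decide
theorem robot_vire_O1 : PySem.List.pyGetD (robotDirecoes.getD 'O' []) 1 'N' = 'N' := by decide
theorem robot_vire_E1 : PySem.List.pyGetD (robotDirecoes.getD 'E' []) 1 'N' = 'S' := by decide
theorem robot_origin_last : PySem.List.pyGetD [((0:Int),(0:Int))] (-1) (0,0) = (0,0) := by decide
theorem robot_origin_rect : robotAltRect [((0:Int),(0:Int))] = (0,0,0,0) := by decide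

theorem robot_inv_step (a : Char × (Int × Int) × List (Int × Int × Int × Int) × (Int × Int × Int × Int))
    (b : List (Int × Int × Int × Int) × List (Int × Int) × (Int × Int)) (c : Char)
    (h : robotInv a b) : robotInv (robotStep a c) (robotAltStep b c) := by
  obtain ⟨dir, pos, rects, rect⟩ := a
  obtain ⟨brects, pts, d⟩ := b
  obtain ⟨hdir, hd, hr, hne, hpos, hrect⟩ := h
  simp only at hdir hd hr hne hpos hrect
  by_cases hA : c = 'A'
  · subst hA
    rcases hdir with h1 | h1 | h1 | h1 <;> subst h1 <;>
      refine ⟨?_, ?_, ?_, ?_, ?_, ?_⟩ <;>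
      simp [robotStep, robotAltStep, robotSomar, hd, hr, hpos, hrect, robotDirVec,
        robot_andar_N, robot_andar_S, robot_andar_O, robot_andar_E,
        PySem.List.pyGetD_neg_one_append_singleton, robot_rect_append pts hne]
  by_cases hE : c = 'E'
  · subst hE
    rcases hdir with h1 | h1 | h1 | h1 <;> subst h1 <;>
      refine ⟨?_, ?_, ?_, ?_, ?_, ?_⟩ <;>
      simp [robotStep, robotAltStep, hd, hr, hne, hpos, hrect, robotDirVec,
        robot_vire_N0, robot_vire_S0, robot_vire_O0, robot_vire_E0]
  by_cases hD : c = 'D'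
  · subst hD
    rcases hdir with h1 | h1 | h1 | h1 <;> subst h1 <;>
      refine ⟨?_, ?_, ?_, ?_, ?_, ?_⟩ <;>
      simp [robotStep, robotAltStep, hd, hr, hne, hpos, hrect, robotDirVec,
        robot_vire_N1, robot_vire_S1, robot_vire_O1, robot_vire_E1]
  by_cases hH : c = 'H'
  · subst hH
    refine ⟨?_, ?_, ?_, ?_, ?_, ?_⟩ <;>
      simp [robotStep, robotAltStep, hd, hr, hne, hpos, hrect, robotDirVec,
        robot_origin_last, robot_origin_rect]
  · refine ⟨?_, ?_, ?_, ?_, ?_, ?_⟩ <;>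
      simp [robotStep, robotAltStep, hA, hE, hD, hH, hdir, hd, hr, hne, hpos, hrect]

theorem robot_inv_fold (l : List Char) :
    ∀ a b, robotInv a b → robotInv (l.foldl robotStep a) (l.foldl robotAltStep b) := by
  induction l with
  | nil => intro a b h; simpa using h
  | cons c t ih => intro a b h; exact ih _ _ (robot_inv_step a b c h)

-- ===== VERDICT (by name: the statement is the Claim_ definition above) =====
theorem robot_spec : Claim_equal_robot := by
  intro s _
  have h0 : robotInv ('N', (0,0), [], (0,0,0,0)) ([], [(0,0)], (0,1)) := by
    refine ⟨by simp, by simp [robotDirVec], rfl, by simp, by decide, by decide⟩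
  have h := robot_inv_fold s.toList _ _ h0
  unfold Spec_robot robot robot_alt
  exact h.2.2.1
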